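-- pv_equiv track=rewrite | github.com/pavlos-io/advent-of-code | 2021/day18/day18.py | get_left_right_indices
-- ===== SOURCE A (Python) =====
-- def parse_int(line, idx):
--     start = idx
--     num = 0
--     while idx < len(line) and line[idx].isdigit():
--         num = num * 10 + int(line[idx])
--         idx += 1
--
--     return num, idx - start
--
-- def get_left_right_indices(line, left_bound, right_bound):
--     left_idx, right_idx = None, None
--     idx = 0
--
--     while idx < left_bound:
--         if line[idx].isdigit():
--             _, d_len = parse_int(line, idx)
--             left_idx = idx
--             idx += d_len - 1
--         idx += 1
--
--     idx = right_bound
--     while idx < len(line):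
--         if line[idx].isdigit():
--             right_idx = idx
--             break
--         idx += 1
--
--     return left_idx, right_idx
-- ===== SOURCE B (Python) =====
-- def get_left_right_indices(line, left_bound, right_bound):
--     # Left side: scan BACKWARD from left_bound-1 to the nearest digit,
--     # then walk to the start of that digit run.
--     left_idx = None
--     idx = left_bound - 1
--     while idx >= 0:
--         if line[idx].isdigit():
--             while idx - 1 >= 0 and line[idx - 1].isdigit():
--                 idx -= 1
--             left_idx = idx
--             break
--         idx -= 1
--
--     # Right side: first digit at index >= right_bound (same scan as A).
--     right_idx = None
--     idx = right_bound
--     while idx < len(line):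
--         if line[idx].isdigit():
--             right_idx = idx
--             break
--         idx += 1
--
--     return left_idx, right_idx
-- ===== Notes on version B (the rewrite author's own statement) =====
-- stated objective: alternative
-- what changed: The left-side forward scan with the parse_int skip helper is replaced by a backward scan from left_bound-1 to the nearest digit followed by a walk to the start of that digit run; parse_int disappears and the traversal direction is reversed.
import Mathlib
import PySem

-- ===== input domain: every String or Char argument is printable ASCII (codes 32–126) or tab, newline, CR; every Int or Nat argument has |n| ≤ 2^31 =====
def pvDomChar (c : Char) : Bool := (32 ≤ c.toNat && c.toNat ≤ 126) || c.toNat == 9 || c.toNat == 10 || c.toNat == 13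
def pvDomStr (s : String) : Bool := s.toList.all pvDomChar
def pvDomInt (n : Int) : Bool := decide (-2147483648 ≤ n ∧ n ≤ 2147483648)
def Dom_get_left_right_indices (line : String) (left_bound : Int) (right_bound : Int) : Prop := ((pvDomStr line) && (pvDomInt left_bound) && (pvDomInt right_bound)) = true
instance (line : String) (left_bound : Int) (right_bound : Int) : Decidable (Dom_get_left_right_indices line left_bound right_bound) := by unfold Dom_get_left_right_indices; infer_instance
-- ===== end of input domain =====

-- B replaces A's forward left-bound scan (and its parse_int skip helper) by a backward scan
-- from left_bound-1 to the nearest digit run's start: an alternative decomposition, same cost.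

-- ===== PORT A =====
-- small named termination facts (cited by the ports' decreasing_by; keeps the compiled bodies small)
theorem pvDecUp {n idx : Int} (h : idx < n) : (n - (idx + 1)).toNat < (n - idx).toNat := by omega
theorem pvDecSkip {lb idx : Int} {k : Nat} (h : idx < lb) (hk : 1 ≤ k) :
    (lb - (idx + (((k : Int)) - 1) + 1)).toNat < (lb - idx).toNat := by omega
theorem pvDecDown {idx : Int} (h : 0 ≤ idx) : (idx - 1 + 1).toNat < (idx + 1).toNat := by omega
theorem pvDecDown1 {idx : Int} (h : 0 ≤ idx - 1) : (idx - 1).toNat < idx.toNat := by omega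

-- parse_int's while loop; returns (num, count of digits consumed), so parse_int's
-- 'idx - start' is that Nat count cast to Int.
def pvParseIntGo (cs : List Char) (idx num : Int) : Int × Nat :=
  if hlt : idx < (cs.length : Int) then
    match PySem.List.pyGet? cs idx with
    | some c =>
      if PySem.Chars.isdigit c then
        let r := pvParseIntGo cs (idx + 1) (num * 10 + ((c.toNat : Int) - 48))
        (r.1, r.2 + 1)
      else (num, 0)
    | none => (num, 0)
  else (num, 0)
termination_by ((cs.length : Int) - idx).toNat
decreasing_by exact pvDecUp hlt

-- int(line[idx]) of a digit char is ported above as toNat-48, exact on digit chars.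
def pvParseInt (cs : List Char) (idx : Int) : Int × Int :=
  let r := pvParseIntGo cs idx 0
  (r.1, (r.2 : Int))

-- the Lean port's termination argument needs: a digit at idx makes parse_int consume ≥ 1 char
theorem pvParseIntGo_pos (cs : List Char) (idx num : Int) (c : Char)
    (h : PySem.List.pyGet? cs idx = some c) (hd : PySem.Chars.isdigit c = true) :
    1 ≤ (pvParseIntGo cs idx num).2 := by
  have hn : ¬ PySem.List.pyGet? cs idx = none := by simp [h]
  rw [PySem.List.pyGet?_eq_none_iff, PySem.Raise.InRange] at hn
  have hlt : idx < (cs.length : Int) := by omega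
  rw [pvParseIntGo]
  simp [hlt, h, hd]

-- A's first while loop (left side)
def pvLeftA (cs : List Char) (lb idx : Int) (acc : Option Int) : Option Int :=
  if hi : idx < lb then
    match hg : PySem.List.pyGet? cs idx with
    | none => acc
    | some c =>
      if hd : PySem.Chars.isdigit c then
        pvLeftA cs lb (idx + ((pvParseInt cs idx).2 - 1) + 1) (some idx)
      else
        pvLeftA cs lb (idx + 1) acc
  else acc
termination_by (lb - idx).toNat
decreasing_by
  · have hk := pvParseIntGo_pos cs idx 0 c hg hd
    simp only [pvParseInt]
    exact pvDecSkip hi hk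
  · exact pvDecUp hi

-- A's second while loop (right side)
def pvRightA (cs : List Char) (idx : Int) : Option Int :=
  if hlt : idx < (cs.length : Int) then
    match PySem.List.pyGet? cs idx with
    | none => none
    | some c => if PySem.Chars.isdigit c then some idx else pvRightA cs (idx + 1)
  else none
termination_by ((cs.length : Int) - idx).toNat
decreasing_by exact pvDecUp hlt

def get_left_right_indices (line : String) (left_bound : Int) (right_bound : Int) : Option Int × Option Int :=
  let cs := line.toList
  (pvLeftA cs left_bound 0 none, pvRightA cs right_bound)

-- ===== PORT B =====
-- B's inner while loop: walk left to the start of the digit run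
def pvWalkBackB (cs : List Char) (idx : Int) : Int :=
  if h : 0 ≤ idx - 1 ∧ (match PySem.List.pyGet? cs (idx - 1) with
                        | some c => PySem.Chars.isdigit c
                        | none => false) = true then
    pvWalkBackB cs (idx - 1)
  else idx
termination_by idx.toNat
decreasing_by exact pvDecDown1 h.1

-- B's outer backward while loop (left side)
def pvLeftB (cs : List Char) (idx : Int) : Option Int :=
  if h : 0 ≤ idx then
    match PySem.List.pyGet? cs idx with
    | none => none
    | some c => if PySem.Chars.isdigit c then some (pvWalkBackB cs idx) else pvLeftB cs (idx - 1)
  else none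
termination_by (idx + 1).toNat
decreasing_by exact pvDecDown h

-- B's right-side while loop (the same scan as A's, kept unchanged)
def pvRightB (cs : List Char) (idx : Int) : Option Int :=
  if hlt : idx < (cs.length : Int) then
    match PySem.List.pyGet? cs idx with
    | none => none
    | some c => if PySem.Chars.isdigit c then some idx else pvRightB cs (idx + 1)
  else none
termination_by ((cs.length : Int) - idx).toNat
decreasing_by exact pvDecUp hlt

def get_left_right_indices_alt (line : String) (left_bound : Int) (right_bound : Int) : Option Int × Option Int :=
  let cs := line.toList
  (pvLeftB cs (left_bound - 1), pvRightB cs right_bound)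

-- ===== PRECONDITION & SPEC =====
-- Pre_ excludes exactly the inputs on which the Python A raises IndexError:
-- left_bound > len(line) (the first loop reads line[len(line)]) or
-- right_bound < -len(line) (the second loop's first read line[right_bound] is out of range).
def Pre_get_left_right_indices (line : String) (left_bound : Int) (right_bound : Int) : Prop :=
  left_bound ≤ (line.toList.length : Int) ∧ -(line.toList.length : Int) ≤ right_bound
instance (line : String) (left_bound : Int) (right_bound : Int) : Decidable (Pre_get_left_right_indices line left_bound right_bound) := by unfold Pre_get_left_right_indices; infer_instance

def pvWitness_get_left_right_indices : String × Int × Int := ("ab[12,[3,4]]", 8, 9)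

def Spec_get_left_right_indices (line : String) (left_bound : Int) (right_bound : Int) (out : Option Int × Option Int) : Prop := out = get_left_right_indices_alt line left_bound right_bound
instance (line : String) (left_bound : Int) (right_bound : Int) (out : Option Int × Option Int) : Decidable (Spec_get_left_right_indices line left_bound right_bound out) := by unfold Spec_get_left_right_indices; infer_instance

-- ===== CLAIM (what is proved, stated in full; the proofs are below) =====
def Claim_equal_get_left_right_indices : Prop := ∀ (line : String) (left_bound : Int) (right_bound : Int), Dom_get_left_right_indices line left_bound right_bound → Pre_get_left_right_indices line left_bound right_bound → Spec_get_left_right_indices line left_bound right_bound (get_left_right_indices line left_bound right_bound)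

-- ===== LEMMAS AND PROOFS =====

-- digit test at an Int index (out of range counts as false); proof-side only
def pvDg (cs : List Char) (i : Int) : Bool :=
  match PySem.List.pyGet? cs i with
  | some c => PySem.Chars.isdigit c
  | none => false

theorem pvGet_some (cs : List Char) (i : Int) (h0 : 0 ≤ i) (hlt : i < (cs.length : Int)) :
    PySem.List.pyGet? cs i = some (cs[i.toNat]?.getD ' ') := by
  rw [PySem.List.pyGet?_of_nonneg _ h0]
  rw [List.getElem?_eq_getElem (show i.toNat < cs.length by omega)]
  rfl

theorem pvGet_none (cs : List Char) (i : Int) (h0 : 0 ≤ i) (hge : (cs.length : Int) ≤ i) :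
    PySem.List.pyGet? cs i = none := by
  rw [PySem.List.pyGet?_of_nonneg _ h0]
  exact List.getElem?_eq_none (by omega)

-- parse_int consumes exactly a maximal digit run that stays inside the string
theorem pvParseIntGo_run (cs : List Char) (idx num : Int) (h0 : 0 ≤ idx) (hle : idx ≤ (cs.length : Int)) :
    (∀ j : Int, idx ≤ j → j < idx + ((pvParseIntGo cs idx num).2 : Int) → pvDg cs j = true) ∧
    pvDg cs (idx + ((pvParseIntGo cs idx num).2 : Int)) = false ∧
    idx + ((pvParseIntGo cs idx num).2 : Int) ≤ (cs.length : Int) := by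
  suffices H : ∀ (n : Nat) (idx num : Int), ((cs.length : Int) - idx).toNat ≤ n → 0 ≤ idx → idx ≤ (cs.length : Int) →
      (∀ j : Int, idx ≤ j → j < idx + ((pvParseIntGo cs idx num).2 : Int) → pvDg cs j = true) ∧
      pvDg cs (idx + ((pvParseIntGo cs idx num).2 : Int)) = false ∧
      idx + ((pvParseIntGo cs idx num).2 : Int) ≤ (cs.length : Int) by
    exact H ((cs.length : Int) - idx).toNat idx num le_rfl h0 hle
  intro n
  induction n with
  | zero =>
    intro idx num hn h0 hle
    have hge : (cs.length : Int) ≤ idx := by omega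
    have hlt : ¬ idx < (cs.length : Int) := by omega
    rw [pvParseIntGo]
    simp only [hlt, dif_neg, not_false_iff]
    refine ⟨by intro j hj1 hj2; omega, ?_, by simp; omega⟩
    simp [pvDg, pvGet_none cs idx h0 hge]
  | succ n ih =>
    intro idx num hn h0 hle
    by_cases hlt : idx < (cs.length : Int)
    · have hsome := pvGet_some cs idx h0 hlt
      set c := cs[idx.toNat]?.getD ' ' with hc
      rw [pvParseIntGo]
      simp only [dif_pos hlt, hsome]
      by_cases hd : PySem.Chars.isdigit c = true
      · simp only [hd, if_true]
        obtain ⟨ih1, ih2, ih3⟩ := ih (idx+1) (num * 10 + ((c.toNat : Int) - 48)) (by omega) (by omega) (by omega)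
        refine ⟨?_, ?_, by push_cast; push_cast at ih3; omega⟩
        · intro j hj1 hj2
          rcases eq_or_lt_of_le hj1 with h | h
          · subst h; simp [pvDg, hsome, hd]
          · exact ih1 j (by omega) (by push_cast; push_cast at hj2; omega)
        · have : idx + (((pvParseIntGo cs (idx+1) (num * 10 + ((c.toNat : Int) - 48))).2 + 1 : Nat) : Int)
              = (idx + 1) + ((pvParseIntGo cs (idx+1) (num * 10 + ((c.toNat : Int) - 48))).2 : Int) := by push_cast; ring
          rw [this]; exact ih2
      · rw [Bool.not_eq_true] at hd
        simp only [hd, Bool.false_eq_true, if_false]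
        refine ⟨by intro j h1 h2; simp at h2; omega, ?_, by simp; omega⟩
        simp only [Nat.cast_zero, add_zero]
        simp [pvDg, hsome, hd]
    · rw [pvParseIntGo]
      simp only [hlt, dif_neg, not_false_iff]
      refine ⟨by intro j h1 h2; simp at h2; omega, ?_, by simp; omega⟩
      simp only [Nat.cast_zero, add_zero]
      simp [pvDg, pvGet_none cs idx h0 (by omega)]

theorem pvWalkBack_cond (cs : List Char) (idx : Int) :
    (match PySem.List.pyGet? cs (idx - 1) with
     | some c => PySem.Chars.isdigit c
     | none => false) = pvDg cs (idx - 1) := rfl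

-- the inner walk of B lands on the start of a digit run
theorem pvWalkBackB_run (cs : List Char) (s : Int) (h0 : 0 ≤ s)
    (hstart : s = 0 ∨ pvDg cs (s - 1) = false) :
    ∀ p : Int, s ≤ p → (∀ j : Int, s ≤ j → j ≤ p → pvDg cs j = true) →
    pvWalkBackB cs p = s := by
  suffices H : ∀ (n : Nat) (p : Int), (p - s).toNat ≤ n → s ≤ p → (∀ j : Int, s ≤ j → j ≤ p → pvDg cs j = true) → pvWalkBackB cs p = s by
    intro p hsp hrun; exact H (p - s).toNat p le_rfl hsp hrun
  intro n
  induction n with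
  | zero =>
    intro p hn hsp hrun
    have hps : p = s := by omega
    subst hps
    rw [pvWalkBackB]
    rw [dif_neg]
    rw [pvWalkBack_cond]
    rcases hstart with h | h
    · omega
    · intro hcon; rw [h] at hcon; exact absurd hcon.2 (by simp)
  | succ n ih =>
    intro p hn hsp hrun
    rcases eq_or_lt_of_le hsp with h | h
    · subst h
      rw [pvWalkBackB, dif_neg]
      rw [pvWalkBack_cond]
      rcases hstart with h | h
      · omega
      · intro hcon; rw [h] at hcon; exact absurd hcon.2 (by simp)
    · rw [pvWalkBackB, dif_pos]
      · exact ih (p - 1) (by omega) (by omega) (fun j h1 h2 => hrun j h1 (by omega))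
      · rw [pvWalkBack_cond]
        exact ⟨by omega, hrun (p - 1) (by omega) (by omega)⟩

-- backward scan from j down to lo for a digit, then walk to the run start; proof-side only
def pvBScan (cs : List Char) (lo j : Int) : Option Int :=
  if lo ≤ j then
    (if pvDg cs j then some (pvWalkBackB cs j) else pvBScan cs lo (j - 1))
  else none
termination_by (j - lo + 1).toNat
decreasing_by omega

theorem pvBScan_shift (cs : List Char) (lo : Int) (hd : pvDg cs lo = false) :
    ∀ j : Int, lo - 1 ≤ j → pvBScan cs lo j = pvBScan cs (lo + 1) j := by
  suffices H : ∀ (n : Nat) (j : Int), (j - lo + 1).toNat ≤ n → lo - 1 ≤ j → pvBScan cs lo j = pvBScan cs (lo + 1) j by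
    intro j hj; exact H (j - lo + 1).toNat j le_rfl hj
  intro n
  induction n with
  | zero =>
    intro j hn hj
    conv_lhs => rw [pvBScan]
    conv_rhs => rw [pvBScan]
    rw [if_neg (by omega), if_neg (by omega)]
  | succ n ih =>
    intro n2 hn hj
    conv_lhs => rw [pvBScan]
    conv_rhs => rw [pvBScan]
    by_cases h1 : lo ≤ n2
    · rcases eq_or_lt_of_le h1 with he | hlt2
      · rw [← he]
        rw [if_neg (show ¬ (lo + 1) ≤ lo by omega), if_pos (le_refl lo), hd]
        simp only [Bool.false_eq_true, if_false]
        rw [pvBScan, if_neg (show ¬ lo ≤ lo - 1 by omega)]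
      · rw [if_pos h1, if_pos (show lo + 1 ≤ n2 by omega)]
        by_cases hdj : pvDg cs n2 = true
        · simp [hdj]
        · rw [Bool.not_eq_true] at hdj
          simp only [hdj, Bool.false_eq_true, if_false]
          exact ih (n2 - 1) (by omega) (by omega)
    · rw [if_neg h1, if_neg (show ¬ (lo + 1) ≤ n2 by omega)]

-- scanning back over a maximal digit run starting at idx yields idx
theorem pvBScan_run (cs : List Char) (idx k : Int) (h0 : 0 ≤ idx) (hk : 1 ≤ k)
    (hrun : ∀ i : Int, idx ≤ i → i < idx + k → pvDg cs i = true)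
    (hstart : idx = 0 ∨ pvDg cs (idx - 1) = false) :
    ∀ j : Int, idx ≤ j →
    pvBScan cs idx j = (match pvBScan cs (idx + k) j with
                        | some r => some r
                        | none => some idx) := by
  suffices H : ∀ (n : Nat) (j : Int), (j - idx).toNat ≤ n → idx ≤ j → pvBScan cs idx j = (match pvBScan cs (idx + k) j with | some r => some r | none => some idx) by
    intro j hj; exact H (j - idx).toNat j le_rfl hj
  intro n
  induction n with
  | zero =>
    intro j hn hj
    have hjk : j < idx + k := by omega
    rw [pvBScan, if_pos hj, hrun j hj hjk]
    simp only [if_true]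
    rw [pvBScan, if_neg (by omega)]
    rw [pvWalkBackB_run cs idx h0 hstart j hj (fun i h1 h2 => hrun i h1 (by omega))]
  | succ n ih =>
    intro j hn hj
    by_cases hjk : j < idx + k
    · rw [pvBScan, if_pos hj, hrun j hj hjk]
      simp only [if_true]
      rw [pvBScan, if_neg (by omega)]
      rw [pvWalkBackB_run cs idx h0 hstart j hj (fun i h1 h2 => hrun i h1 (by omega))]
    · rw [pvBScan, if_pos hj]
      conv_rhs => rw [pvBScan, if_pos (by omega : idx + k ≤ j)]
      by_cases hdj : pvDg cs j = true
      · simp [hdj]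
      · rw [Bool.not_eq_true] at hdj
        rw [hdj]
        simp only [Bool.false_eq_true, if_false]
        exact ih (j - 1) (by omega) (by omega)

theorem pvLeftB_eq_bscan (cs : List Char) :
    ∀ j : Int, j < (cs.length : Int) → pvLeftB cs j = pvBScan cs 0 j := by
  suffices H : ∀ (n : Nat) (j : Int), (j + 1).toNat ≤ n → j < (cs.length : Int) → pvLeftB cs j = pvBScan cs 0 j by
    intro j hj; exact H (j + 1).toNat j le_rfl hj
  intro n
  induction n with
  | zero =>
    intro j hn hj
    rw [pvLeftB, dif_neg (by omega), pvBScan, if_neg (by omega)]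
  | succ n ih =>
    intro j hn hj
    by_cases h0 : 0 ≤ j
    · have hsome := pvGet_some cs j h0 hj
      rw [pvLeftB, dif_pos h0, pvBScan, if_pos h0]
      simp only [hsome]
      have hdg : pvDg cs j = PySem.Chars.isdigit (cs[j.toNat]?.getD ' ') := by
        simp [pvDg, hsome]
      rw [hdg]
      by_cases hd : PySem.Chars.isdigit (cs[j.toNat]?.getD ' ') = true
      · simp [hd]
      · rw [Bool.not_eq_true] at hd
        simp only [hd, Bool.false_eq_true, if_false]
        exact ih (j - 1) (by omega) (by omega)
    · rw [pvLeftB, dif_neg h0, pvBScan, if_neg (by omega)]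

-- A's forward left loop computes the backward scan's answer (invariant: idx is never
-- strictly inside a digit run)
theorem pvLeftA_inv (cs : List Char) (lb : Int) (hlb : lb ≤ (cs.length : Int)) :
    ∀ idx acc, 0 ≤ idx → idx ≤ (cs.length : Int) →
    (pvDg cs idx = true → (idx = 0 ∨ pvDg cs (idx - 1) = false)) →
    pvLeftA cs lb idx acc = (match pvBScan cs idx (lb - 1) with
                             | some r => some r
                             | none => acc) := by
  suffices H : ∀ (n : Nat) (idx : Int) (acc : Option Int), (lb - idx).toNat ≤ n → 0 ≤ idx → idx ≤ (cs.length : Int) → (pvDg cs idx = true → (idx = 0 ∨ pvDg cs (idx - 1) = false)) → pvLeftA cs lb idx acc = (match pvBScan cs idx (lb - 1) with | some r => some r | none => acc) by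
    intro idx acc h0 hle hinv; exact H (lb - idx).toNat idx acc le_rfl h0 hle hinv
  intro n
  induction n with
  | zero =>
    intro idx acc hn h0 hle hinv
    rw [pvLeftA, dif_neg (by omega), pvBScan, if_neg (by omega)]
  | succ n ih =>
    intro idx acc hn h0 hle hinv
    by_cases hi : idx < lb
    · have hlt : idx < (cs.length : Int) := by omega
      have hsome := pvGet_some cs idx h0 hlt
      have hdg : pvDg cs idx = PySem.Chars.isdigit (cs[idx.toNat]?.getD ' ') := by
        simp [pvDg, hsome]
      rw [pvLeftA, dif_pos hi]
      split
      next hg => rw [hsome] at hg; exact absurd hg (by simp)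
      next c hg =>
      have hc : c = cs[idx.toNat]?.getD ' ' := by
        rw [hg] at hsome; exact Option.some.inj hsome
      subst hc
      by_cases hd : PySem.Chars.isdigit (cs[idx.toNat]?.getD ' ') = true
      · rw [dif_pos hd]
        obtain ⟨hrun, hend, hbound⟩ := pvParseIntGo_run cs idx 0 h0 hle
        have hk1 : 1 ≤ (pvParseIntGo cs idx 0).2 := pvParseIntGo_pos cs idx 0 _ hsome hd
        have harg : idx + ((pvParseInt cs idx).2 - 1) + 1 = idx + ((pvParseIntGo cs idx 0).2 : Int) := by
          simp [pvParseInt]; ring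
        rw [harg]
        rw [ih (idx + ((pvParseIntGo cs idx 0).2 : Int)) (some idx) (by omega) (by omega) hbound
            (fun h => absurd h (by simp [hend]))]
        rw [pvBScan_run cs idx ((pvParseIntGo cs idx 0).2 : Int) h0 (by exact_mod_cast hk1) hrun
            (hinv (by rw [hdg]; exact hd)) (lb - 1) (by omega)]
        cases pvBScan cs (idx + ((pvParseIntGo cs idx 0).2 : Int)) (lb - 1) <;> rfl
      · rw [Bool.not_eq_true] at hd
        rw [dif_neg (by simp [hd])]
        rw [ih (idx + 1) acc (by omega) (by omega) (by omega)
            (fun h => Or.inr (by rw [show idx + 1 - 1 = idx by ring, hdg, hd]))]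
        rw [pvBScan_shift cs idx (by rw [hdg, hd]) (lb - 1) (by omega)]
    · rw [pvLeftA, dif_neg hi, pvBScan, if_neg (by omega)]

theorem pvRight_eq (cs : List Char) : ∀ idx : Int, pvRightA cs idx = pvRightB cs idx := by
  suffices H : ∀ (n : Nat) (idx : Int), ((cs.length : Int) - idx).toNat ≤ n → pvRightA cs idx = pvRightB cs idx by
    intro idx; exact H ((cs.length : Int) - idx).toNat idx le_rfl
  intro n
  induction n with
  | zero =>
    intro idx hn
    rw [pvRightA, pvRightB]
    by_cases hlt : idx < (cs.length : Int)
    · have h0 : (0:Int) ≤ idx := by omega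
      rw [dif_pos hlt, dif_pos hlt, pvGet_some cs idx h0 hlt]
      by_cases hd : PySem.Chars.isdigit (cs[idx.toNat]?.getD ' ') = true
      · simp [hd]
      · omega
    · rw [dif_neg hlt, dif_neg hlt]
  | succ n ih =>
    intro idx hn
    rw [pvRightA, pvRightB]
    by_cases hlt : idx < (cs.length : Int)
    · by_cases h0 : 0 ≤ idx
      · rw [dif_pos hlt, dif_pos hlt, pvGet_some cs idx h0 hlt]
        by_cases hd : PySem.Chars.isdigit (cs[idx.toNat]?.getD ' ') = true
        · simp [hd]
        · rw [Bool.not_eq_true] at hd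
          simp only [hd, Bool.false_eq_true, if_false]
          exact ih (idx + 1) (by omega)
      · have hneg : PySem.List.pyGet? cs idx = PySem.List.pyGet? cs idx := rfl
        rw [dif_pos hlt, dif_pos hlt]
        cases hg : PySem.List.pyGet? cs idx with
        | none => rfl
        | some c =>
          by_cases hd : PySem.Chars.isdigit c = true
          · simp [hd]
          · rw [Bool.not_eq_true] at hd
            simp only [hd, Bool.false_eq_true, if_false]
            exact ih (idx + 1) (by omega)
    · rw [dif_neg hlt, dif_neg hlt]

theorem pvAB_eq (line : String) (lb rb : Int) (h1 : lb ≤ (line.toList.length : Int)) :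
    get_left_right_indices line lb rb = get_left_right_indices_alt line lb rb := by
  show (pvLeftA line.toList lb 0 none, pvRightA line.toList rb)
      = (pvLeftB line.toList (lb - 1), pvRightB line.toList rb)
  have hL : pvLeftA line.toList lb 0 none = pvLeftB line.toList (lb - 1) := by
    rw [pvLeftA_inv line.toList lb h1 0 none le_rfl (by omega) (fun _ => Or.inl rfl)]
    rw [pvLeftB_eq_bscan line.toList (lb - 1) (by omega)]
    cases pvBScan line.toList 0 (lb - 1) <;> rfl
  rw [hL, pvRight_eq]

-- ===== VERDICT (by name: the statement is the Claim_ definition above) =====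
theorem get_left_right_indices_spec : Claim_equal_get_left_right_indices := by
  intro line lb rb _ hpre
  unfold Spec_get_left_right_indices
  exact pvAB_eq line lb rb hpre.1
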